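-- pv_equiv track=rewrite | github.com/paiml/depyler | examples/hard_encode_huffman.py | sorted_frequencies
-- ===== SOURCE A (Python) =====
-- def char_frequency(text: str) -> dict[str, int]:
--     freq: dict[str, int] = {}
--     n: int = len(text)
--     i: int = 0
--     while i < n:
--         ch: str = text[i]
--         if ch in freq:
--             old: int = freq[ch]
--             freq[ch] = old + 1
--         else:
--             freq[ch] = 1
--         i = i + 1
--     return freq
--
-- def sorted_frequencies(text: str) -> list[int]:
--     freq: dict[str, int] = char_frequency(text)
--     vals: list[int] = []
--     n: int = len(text)
--     i: int = 0
--     while i < n: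
--         ch: str = text[i]
--         if ch in freq:
--             vals.append(freq[ch])
--             freq[ch] = 0 - 1
--         i = i + 1
--     result: list[int] = []
--     j: int = 0
--     nv: int = len(vals)
--     while j < nv:
--         v: int = vals[j]
--         if v > 0:
--             result.append(v)
--         j = j + 1
--     k: int = 0
--     nr: int = len(result)
--     while k < nr - 1:
--         m: int = k + 1
--         while m < nr:
--             rk: int = result[k]
--             rm: int = result[m]
--             if rk > rm:
--                 result[k] = rm
--                 result[m] = rk
--             m = m + 1
--         k = k + 1
--     return result
-- ===== SOURCE B (Python) =====
-- def sorted_frequencies(text: str) -> list[int]: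
--     # Sort the characters so equal ones are adjacent, then collect run lengths.
--     counts: list[int] = []
--     prev = None
--     run = 0
--     for ch in sorted(text):
--         if ch == prev:
--             run = run + 1
--         else:
--             if prev is not None:
--                 counts.append(run)
--             prev = ch
--             run = 1
--     if prev is not None:
--         counts.append(run)
--     return sorted(counts)
-- ===== Notes on version B (the rewrite author's own statement) =====
-- stated objective: faster
-- what changed: Replaces A's hash-dict counting, two index-driven marking passes and hand-written quadratic exchange sort with sort-then-run-length grouping: sort the characters, collect run lengths in one linear scan, and sort the counts with the built-in sort.
import Mathlib
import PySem

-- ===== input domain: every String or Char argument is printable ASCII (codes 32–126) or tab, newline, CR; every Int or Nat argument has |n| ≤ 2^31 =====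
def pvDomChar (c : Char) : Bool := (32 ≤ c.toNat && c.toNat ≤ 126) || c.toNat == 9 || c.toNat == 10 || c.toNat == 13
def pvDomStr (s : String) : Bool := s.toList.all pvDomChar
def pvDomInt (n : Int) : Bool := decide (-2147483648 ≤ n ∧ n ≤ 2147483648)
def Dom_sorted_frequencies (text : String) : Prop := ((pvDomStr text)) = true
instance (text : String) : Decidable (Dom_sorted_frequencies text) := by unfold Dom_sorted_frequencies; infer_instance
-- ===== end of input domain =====

-- B replaces A's dict counting, marking pass and hand-written exchange sort by sort-then-run-length grouping (different algorithm; measured faster in a timing run).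

-- ===== PORT A =====
def char_frequency (text : String) : PySem.Dict Char Int :=
  text.toList.foldl (fun freq ch =>
    if freq.contains ch then
      freq.insert ch (freq.getD ch 0 + 1)
    else
      freq.insert ch 1) PySem.Dict.empty

-- A's inner while loop (m) of the exchange sort, mutating `result` via index assignment
def pvInnerA (res : List Int) (k m : Int) : List Int :=
  if _h : m < PySem.List.len res then
    pvInnerA
      (if PySem.List.pyGetD res k 0 > PySem.List.pyGetD res m 0 then
        PySem.List.pySetD (PySem.List.pySetD res k (PySem.List.pyGetD res m 0)) m (PySem.List.pyGetD res k 0)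
      else res) k (m + 1)
  else res
termination_by (PySem.List.len res - m).toNat
decreasing_by
  split <;> simp_all [PySem.List.len_eq, PySem.List.length_pySetD]

-- length is preserved (cited by pvOuterA's termination proof)
theorem pvInnerA_length (k : Int) (res : List Int) (m : Int) : (pvInnerA res k m).length = res.length := by
  induction res, m using pvInnerA.induct (k := k) with
  | case1 res m h ih =>
    rw [pvInnerA, dif_pos h]
    by_cases hc : PySem.List.pyGetD res k 0 > PySem.List.pyGetD res m 0 <;>
      · simp only [hc, if_pos, if_neg, dif_pos, dif_neg, not_false_iff] at ih ⊢
        rw [ih]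
        try simp [PySem.List.length_pySetD]
  | case2 res m h => rw [pvInnerA, dif_neg h]

-- A's outer while loop (k)
def pvOuterA (res : List Int) (k : Int) : List Int :=
  if _h : k < PySem.List.len res - 1 then
    pvOuterA (pvInnerA res k (k + 1)) (k + 1)
  else res
termination_by (PySem.List.len res - 1 - k).toNat
decreasing_by
  simp_all [PySem.List.len_eq, pvInnerA_length]

def sorted_frequencies (text : String) : List Int :=
  let freq := char_frequency text
  let fv := text.toList.foldl
    (fun (p : PySem.Dict Char Int × List Int) ch =>
      if p.1.contains ch then (p.1.insert ch (0 - 1), p.2 ++ [p.1.getD ch 0]) else p)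
    (freq, [])
  let result := fv.2.foldl (fun r v => if v > 0 then r ++ [v] else r) []
  pvOuterA result 0

-- ===== PORT B =====
-- the run-length loop over the sorted characters (prev, run, counts as in Source B)
def pvRunLoop : List Char → Option Char → Int → List Int → List Int
  | [], prev, run, counts =>
      match prev with
      | none => counts
      | some _ => counts ++ [run]
  | ch :: rest, prev, run, counts =>
      if prev == some ch then pvRunLoop rest prev (run + 1) counts
      else
        match prev with
        | none => pvRunLoop rest (some ch) 1 counts
        | some _ => pvRunLoop rest (some ch) 1 (counts ++ [run])

def sorted_frequencies_alt (text : String) : List Int :=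
  PySem.List.sorted (pvRunLoop (PySem.List.sorted text.toList (fun c => c)) none 0 []) (fun v => v)

-- ===== PRECONDITION & SPEC =====
def Spec_sorted_frequencies (text : String) (out : List Int) : Prop := out = sorted_frequencies_alt text
instance (text : String) (out : List Int) : Decidable (Spec_sorted_frequencies text out) := by unfold Spec_sorted_frequencies; infer_instance

-- ===== CLAIM (what is proved, stated in full; the proofs are below) =====
def Claim_equal_sorted_frequencies : Prop := ∀ (text : String), Dom_sorted_frequencies text → Spec_sorted_frequencies text (sorted_frequencies text)

-- ===== LEMMAS AND PROOFS =====

-- distinct characters (first-occurrence order), each mapped to its total count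
def pvCnt (s : List Char) : List Int :=
  (PySem.Set.ofList s).map (fun c => ((s.count c : Nat) : Int))

theorem pvChar_frequency_eq (text : String) :
    char_frequency text = PySem.Dict.counter text.toList := by
  unfold char_frequency
  have hf : (fun (freq : PySem.Dict Char Int) ch =>
      if freq.contains ch then freq.insert ch (freq.getD ch 0 + 1) else freq.insert ch 1)
      = fun d x => d.insert x (d.getD x 0 + 1) := by
    funext d c
    by_cases h : d.contains c = true
    · simp [h]
    · simp only [Bool.not_eq_true] at h
      simp [h, PySem.Dict.getD_of_not_contains d 0 h]
  rw [hf, PySem.Dict.foldl_insert_getD_add_one_eq_counter]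

-- the values appended by A's marking pass: count at first occurrence, -1 afterwards
def pvFirstVals (d : PySem.Dict Char Int) : List Char → List Int
  | [] => []
  | x :: l => d.getD x 0 :: pvFirstVals (d.insert x (0 - 1)) l

theorem pvValsLoop_eq (l : List Char) : ∀ (d : PySem.Dict Char Int) (acc : List Int),
    (∀ x ∈ l, d.contains x = true) →
    (l.foldl (fun (p : PySem.Dict Char Int × List Int) ch =>
        if p.1.contains ch then (p.1.insert ch (0 - 1), p.2 ++ [p.1.getD ch 0]) else p) (d, acc)).2
      = acc ++ pvFirstVals d l := by
  induction l with
  | nil => intro d acc _; simp [pvFirstVals]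
  | cons x l ih =>
    intro d acc h
    have hx : d.contains x = true := h x (by simp)
    simp only [List.foldl_cons, hx, if_pos]
    rw [ih (d.insert x (0 - 1)) (acc ++ [d.getD x 0])
      (fun y hy => by
        rw [PySem.Dict.contains_insert]
        simp [h y (by simp [hy])])]
    simp [pvFirstVals]

theorem pvFilter_firstVals (l : List Char) : ∀ (d : PySem.Dict Char Int),
    (∀ x ∈ l, d.getD x 0 = -1 ∨ 0 < d.getD x 0) →
    (pvFirstVals d l).filter (fun v => decide (v > 0))
      = ((PySem.Set.ofList l).filter (fun c => decide (0 < d.getD c 0))).map (fun c => d.getD c 0) := by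
  induction l with
  | nil => intro d _; simp [pvFirstVals, PySem.Set.ofList_nil]
  | cons x l ih =>
    intro d h
    have hd' : ∀ y ∈ l, (d.insert x (0-1)).getD y 0 = -1 ∨ 0 < (d.insert x (0-1)).getD y 0 := by
      intro y hy
      rw [PySem.Dict.getD_insert]
      by_cases hyx : y = x
      · simp [hyx]
      · simp [hyx]; exact h y (by simp [hy])
    have hins : ∀ c, c ≠ x → (d.insert x (0-1)).getD c 0 = d.getD c 0 := by
      intro c hc; rw [PySem.Dict.getD_insert, if_neg hc]
    have key : ((PySem.Set.ofList l).filter (fun c => decide (0 < (d.insert x (0-1)).getD c 0))).map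
          (fun c => (d.insert x (0-1)).getD c 0)
        = (((PySem.Set.ofList l).discard x).filter (fun c => decide (0 < d.getD c 0))).map
          (fun c => d.getD c 0) := by
      have hfil : (PySem.Set.ofList l).filter (fun c => decide (0 < (d.insert x (0-1)).getD c 0))
          = ((PySem.Set.ofList l).discard x).filter (fun c => decide (0 < d.getD c 0)) := by
        simp only [PySem.Set.discard, List.filter_filter]
        apply List.filter_congr
        intro c _
        by_cases hcx : c = x
        · subst hcx; rw [PySem.Dict.getD_insert, if_pos rfl]; simp
        · rw [hins c hcx]; simp [hcx, Bool.and_comm]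
      rw [hfil]
      apply List.map_congr_left
      intro c hc
      have : c ≠ x := by
        rcases List.mem_filter.mp hc with ⟨h1, _⟩
        rcases List.mem_filter.mp h1 with ⟨_, h2⟩
        simpa using h2
      exact hins c this
    rcases h x (by simp) with hx | hx
    · -- seen: head filtered out on both sides
      rw [pvFirstVals]
      rw [List.filter_cons_of_neg (by simp [hx])]
      rw [ih _ hd', key, PySem.Set.ofList_cons]
      rw [List.filter_cons_of_neg (by simp [hx])]
    · rw [pvFirstVals]
      rw [List.filter_cons_of_pos (by simp [hx])]
      rw [ih _ hd', key, PySem.Set.ofList_cons]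
      rw [List.filter_cons_of_pos (by simp [hx])]
      simp

-- Set.discard of an ofList is ofList of the filtered list
theorem pvDiscard_ofList (l : List Char) (x : Char) :
    (PySem.Set.ofList l).discard x = PySem.Set.ofList (l.filter (fun y => !(y == x))) := by
  induction l with
  | nil => simp [PySem.Set.ofList_nil, PySem.Set.discard]
  | cons y l ih =>
    by_cases h : y = x
    · subst h
      rw [PySem.Set.ofList_cons]
      simp only [List.filter_cons, beq_self_eq_true, Bool.not_true, Bool.false_eq_true, if_neg,
        not_false_iff]
      rw [← ih]
      simp [PySem.Set.discard, List.filter_filter]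
    · rw [PySem.Set.ofList_cons]
      have hfc : (y :: l).filter (fun z => !(z == x)) = y :: l.filter (fun z => !(z == x)) := by
        simp [h]
      rw [hfc, PySem.Set.ofList_cons, ← ih]
      simp only [PySem.Set.discard, List.filter_cons]
      simp [h, List.filter_filter, Bool.and_comm]

theorem pvCnt_cons (x : Char) (l : List Char) :
    pvCnt (x :: l) = ((1 + (l.count x : Int))) :: pvCnt (l.filter (fun y => !(y == x))) := by
  unfold pvCnt
  rw [PySem.Set.ofList_cons, pvDiscard_ofList]
  simp only [List.map_cons, List.count_cons_self]
  congr 1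
  · push_cast; ring
  · apply List.map_congr_left
    intro d hd
    have hdx : d ≠ x := by
      have := (PySem.Set.mem_ofList _ d).mp hd
      rcases List.mem_filter.mp this with ⟨_, h2⟩
      simpa using h2
    have hp : (fun y => !(y == x)) d = true := by simpa using hdx
    rw [show List.count d (List.filter (fun y => !(y == x)) l) = List.count d l from List.count_filter hp]
    simp [(Ne.symm hdx : x ≠ d)]

theorem pvRunLoop_some (t : List Char) : ∀ (c : Char) (r : Int) (acc : List Int),
    List.Pairwise (· ≤ ·) (c :: t) →
    pvRunLoop t (some c) r acc
      = acc ++ (r + (t.count c : Int)) :: pvCnt (t.filter (fun y => !(y == c))) := by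
  induction t with
  | nil => intro c r acc _; simp [pvRunLoop, pvCnt, PySem.Set.ofList_nil]
  | cons x t ih =>
    intro c r acc hp
    by_cases hcx : c = x
    · subst hcx
      rw [pvRunLoop, if_pos (by simp)]
      rw [ih c (r + 1) acc (by
        rcases List.pairwise_cons.mp hp with ⟨h1, h2⟩
        exact List.pairwise_cons.mpr ⟨fun y hy => h1 y (by simp [hy]), (List.pairwise_cons.mp h2).2⟩)]
      congr 2
      · simp [List.count_cons]
        push_cast
        ring
      · simp
    · 
      rcases List.pairwise_cons.mp hp with ⟨h1, h2⟩
      have hcnin : c ∉ x :: t := by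
        intro hmem
        rcases List.mem_cons.mp hmem with rfl | hmem
        · exact hcx rfl
        · have hxc : x ≤ c := (List.pairwise_cons.mp h2).1 c hmem
          have hcx' : c ≤ x := h1 x (by simp)
          exact hcx (le_antisymm hcx' hxc)
      rw [pvRunLoop, if_neg (by simpa using hcx)]
      rw [ih x 1 (acc ++ [r]) h2]
      have hcount : (x :: t).count c = 0 := List.count_eq_zero.mpr hcnin
      have hfilt : (x :: t).filter (fun y => !(y == c)) = x :: t := by
        apply List.filter_eq_self.mpr
        intro y hy
        simp only [Bool.not_eq_true']
        exact beq_eq_false_iff_ne.mpr (fun h => hcnin (h ▸ hy))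
      rw [hcount, hfilt, pvCnt_cons]
      simp

theorem pvRunLoop_none (t : List Char) (h : List.Pairwise (· ≤ ·) t) :
    pvRunLoop t none 0 [] = pvCnt t := by
  cases t with
  | nil => simp [pvRunLoop, pvCnt, PySem.Set.ofList_nil]
  | cons x t =>
    rw [pvRunLoop, if_neg (by simp)]
    rw [pvRunLoop_some t x 1 [] h, pvCnt_cons]
    simp

theorem pvGetD_append_len (pre l : List Int) (v d : Int) :
    (pre ++ (v :: l)).getD pre.length d = v := by
  simp [List.getD_eq_getElem?_getD]

theorem pvSet_append_len (pre l : List Int) (v w : Int) :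
    (pre ++ (v :: l)).set pre.length w = pre ++ (w :: l) := by
  rw [List.set_append]
  simp

-- functional form of one inner pass: bubble the minimum into the pivot
def pvPass (v : Int) : List Int → Int × List Int
  | [] => (v, [])
  | x :: xs =>
    if v > x then ((pvPass x xs).1, v :: (pvPass x xs).2)
    else ((pvPass v xs).1, x :: (pvPass v xs).2)

theorem pvPass_perm (xs : List Int) : ∀ v, ((pvPass v xs).1 :: (pvPass v xs).2).Perm (v :: xs) := by
  induction xs with
  | nil => intro v; simp [pvPass]
  | cons x xs ih =>
    intro v
    by_cases h : v > x <;> simp only [pvPass, h, if_pos, if_neg, not_false_iff]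
    · exact (List.Perm.swap v (pvPass x xs).1 (pvPass x xs).2).trans ((ih x).cons v)
    · exact ((List.Perm.swap x (pvPass v xs).1 (pvPass v xs).2).trans ((ih v).cons x)).trans (List.Perm.swap v x xs)

theorem pvPass_min (xs : List Int) : ∀ v, (pvPass v xs).1 ≤ v ∧ ∀ y ∈ (pvPass v xs).2, (pvPass v xs).1 ≤ y := by
  induction xs with
  | nil => intro v; simp [pvPass]
  | cons x xs ih =>
    intro v
    by_cases h : v > x <;> simp only [pvPass, h, if_pos, if_neg, not_false_iff]
    · refine ⟨le_trans (ih x).1 (le_of_lt h), ?_⟩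
      intro y hy
      rcases List.mem_cons.mp hy with rfl | hy
      · exact le_trans (ih x).1 (le_of_lt h)
      · exact (ih x).2 y hy
    · refine ⟨(ih v).1, ?_⟩
      intro y hy
      rcases List.mem_cons.mp hy with rfl | hy
      · exact le_trans (ih v).1 (le_of_not_gt h)
      · exact (ih v).2 y hy

theorem pvPass_len (xs : List Int) : ∀ v, (pvPass v xs).2.length = xs.length := by
  induction xs with
  | nil => intro v; simp [pvPass]
  | cons x xs ih =>
    intro v
    by_cases h : v > x <;> simp [pvPass, h, ih]

theorem pvInnerA_eq (pre suf : List Int) : ∀ (mid : List Int) (v : Int),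
    pvInnerA (pre ++ (v :: (mid ++ suf))) (pre.length) ((pre.length : Int) + 1 + mid.length)
      = pre ++ ((pvPass v suf).1 :: (mid ++ (pvPass v suf).2)) := by
  induction suf with
  | nil =>
    intro mid v
    rw [pvInnerA, dif_neg (by simp only [PySem.List.len_eq, List.length_append, List.length_cons, List.length_nil]; push_cast; omega)]
    simp [pvPass]
  | cons x suf ih =>
    intro mid v
    have hassoc : pre ++ (v :: (mid ++ (x :: suf))) = (pre ++ (v :: mid)) ++ (x :: suf) := by
      simp
    have h1 : PySem.List.pyGetD (pre ++ (v :: (mid ++ (x :: suf)))) (pre.length) 0 = v := by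
      rw [PySem.List.pyGetD_natCast, pvGetD_append_len]
    have hm : ((pre.length : Int) + 1 + mid.length) = (((pre ++ (v :: mid)).length : Int)) := by
      push_cast [List.length_append, List.length_cons]; ring
    have h2 : PySem.List.pyGetD (pre ++ (v :: (mid ++ (x :: suf)))) ((pre.length : Int) + 1 + mid.length) 0 = x := by
      rw [hassoc, hm, PySem.List.pyGetD_natCast, pvGetD_append_len]
    rw [pvInnerA, dif_pos (by simp only [PySem.List.len_eq, List.length_append, List.length_cons, List.length_nil]; push_cast; omega)]
    rw [h1, h2]
    by_cases hc : v > x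
    · rw [if_pos hc]
      have hs1 : PySem.List.pySetD (pre ++ (v :: (mid ++ (x :: suf)))) (pre.length) x
          = pre ++ (x :: (mid ++ (x :: suf))) := by
        rw [PySem.List.pySetD_natCast, pvSet_append_len]
      rw [hs1]
      have hs2 : PySem.List.pySetD (pre ++ (x :: (mid ++ (x :: suf)))) ((pre.length : Int) + 1 + mid.length) v
          = pre ++ (x :: ((mid ++ [v]) ++ suf)) := by
        have hassoc2 : pre ++ (x :: (mid ++ (x :: suf))) = (pre ++ (x :: mid)) ++ (x :: suf) := by
          simp
        have hm2 : ((pre.length : Int) + 1 + mid.length) = (((pre ++ (x :: mid)).length : Int)) := by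
          push_cast [List.length_append, List.length_cons]; ring
        rw [hassoc2, hm2, PySem.List.pySetD_natCast, pvSet_append_len]
        simp
      rw [hs2]
      have harg : ((pre.length : Int) + 1 + (mid.length : Int)) + 1
          = (pre.length : Int) + 1 + (((mid ++ [v]).length : Int)) := by
        push_cast [List.length_append, List.length_cons, List.length_nil]; ring
      rw [harg, ih (mid ++ [v]) x]
      simp [pvPass, hc]
    · rw [if_neg hc]
      have hL2 : pre ++ (v :: (mid ++ (x :: suf))) = pre ++ (v :: ((mid ++ [x]) ++ suf)) := by simp
      have harg : ((pre.length : Int) + 1 + (mid.length : Int)) + 1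
          = (pre.length : Int) + 1 + (((mid ++ [x]).length : Int)) := by
        push_cast [List.length_append, List.length_cons, List.length_nil]; ring
      rw [hL2, harg, ih (mid ++ [x]) v]
      simp [pvPass, hc]

theorem pvOuterA_spec (n : Nat) : ∀ (rest pre : List Int), rest.length ≤ n →
    List.Pairwise (· ≤ ·) pre → (∀ a ∈ pre, ∀ b ∈ rest, a ≤ b) →
    ∃ rest', rest'.Perm rest ∧ pvOuterA (pre ++ rest) (pre.length) = pre ++ rest'
      ∧ List.Pairwise (· ≤ ·) (pre ++ rest') := by
  induction n with
  | zero =>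
    intro rest pre hlen hpre hle
    have : rest = [] := List.length_eq_zero_iff.mp (Nat.le_zero.mp hlen)
    subst this
    refine ⟨[], List.Perm.refl _, ?_, by simpa using hpre⟩
    rw [pvOuterA, dif_neg (by simp only [PySem.List.len_eq, List.length_append, List.length_cons, List.length_nil]; omega)]
  | succ n ih =>
    intro rest pre hlen hpre hle
    match hrest : rest with
    | [] =>
      refine ⟨[], List.Perm.refl _, ?_, by simpa using hpre⟩
      rw [pvOuterA, dif_neg (by simp only [PySem.List.len_eq, List.length_append, List.length_cons, List.length_nil]; omega)]
    | [x] =>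
      refine ⟨[x], List.Perm.refl _, ?_, ?_⟩
      · rw [pvOuterA, dif_neg (by simp only [PySem.List.len_eq, List.length_append, List.length_cons, List.length_nil]; omega)]
      · rw [List.pairwise_append]
        exact ⟨hpre, List.pairwise_singleton _ _, fun a ha b hb => hle a ha b (by simpa using hb)⟩
    | v :: y :: suf0 =>
      set suf := y :: suf0 with hsuf
      rw [pvOuterA, dif_pos (by simp [PySem.List.len_eq, hsuf]; omega)]
      have hinner := pvInnerA_eq pre suf [] v
      simp only [List.nil_append, List.append_nil, List.length_nil, Nat.cast_zero, add_zero] at hinner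
      rw [hinner]
      set w := (pvPass v suf).1 with hw
      set p2 := (pvPass v suf).2 with hp2
      have hperm : (w :: p2).Perm (v :: suf) := pvPass_perm suf v
      have hwmem : w ∈ v :: suf := hperm.mem_iff.mp (by simp)
      have hassoc : pre ++ (w :: p2) = (pre ++ [w]) ++ p2 := by simp
      have hk : (pre.length : Int) + 1 = (((pre ++ [w]).length : Int)) := by
        push_cast [List.length_append, List.length_cons, List.length_nil]; ring
      rw [hassoc, hk]
      have hple : ∀ a ∈ pre ++ [w], ∀ b ∈ p2, a ≤ b := by
        intro a ha b hb
        have hbmem : b ∈ v :: suf := hperm.mem_iff.mp (show b ∈ w :: p2 by simp [hb])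
        rcases List.mem_append.mp ha with ha | ha
        · exact hle a ha b hbmem
        · have : a = w := by simpa using ha
          subst this
          exact (pvPass_min suf v).2 b hb
      have hppre : List.Pairwise (· ≤ ·) (pre ++ [w]) := by
        rw [List.pairwise_append]
        exact ⟨hpre, List.pairwise_singleton _ _, fun a ha b hb => by
          have : b = w := by simpa using hb
          subst this
          exact hle a ha w hwmem⟩
      have hlen2 : p2.length ≤ n := by
        have hplen := pvPass_len suf v
        rw [← hp2] at hplen
        simp only [List.length_cons] at hlen
        omega
      rcases ih p2 (pre ++ [w]) hlen2 hppre hple with ⟨rest'', hperm'', heq'', hpair''⟩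
      refine ⟨w :: rest'', ?_, ?_, ?_⟩
      · exact ((hperm''.cons w).trans hperm)
      · rw [heq'']; simp
      · simpa using hpair''

theorem pvA_eq (text : String) :
    sorted_frequencies text = PySem.List.sorted (pvCnt text.toList) (fun v => v) := by
  unfold sorted_frequencies
  dsimp only
  rw [pvChar_frequency_eq]
  have hcont : ∀ x ∈ text.toList, (PySem.Dict.counter text.toList).contains x = true := by
    intro x hx
    rw [PySem.Dict.contains_counter]
    simpa using hx
  rw [pvValsLoop_eq text.toList (PySem.Dict.counter text.toList) [] hcont]
  have hfold : (fun (r : List Int) v => if v > 0 then r ++ [v] else r)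
      = fun (r : List Int) v => if (fun x : Int => decide (x > 0)) v = true then r ++ [(fun x : Int => x) v] else r := by
    funext r v
    simp
  rw [List.nil_append, hfold, PySem.List.foldl_append_if]
  have hpos : ∀ x ∈ text.toList,
      (PySem.Dict.counter text.toList).getD x 0 = -1 ∨ 0 < (PySem.Dict.counter text.toList).getD x 0 := by
    intro x hx
    right
    rw [PySem.Dict.getD_counter]
    exact_mod_cast List.count_pos_iff.mpr hx
  have hmapid : List.map (fun x : Int => x) (List.filter (fun x : Int => decide (x > 0)) (pvFirstVals (PySem.Dict.counter text.toList) text.toList))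
      = List.filter (fun v : Int => decide (v > 0)) (pvFirstVals (PySem.Dict.counter text.toList) text.toList) := by
    simp
  rw [List.nil_append, hmapid, pvFilter_firstVals text.toList (PySem.Dict.counter text.toList) hpos]
  have hres : ((PySem.Set.ofList text.toList).filter
        (fun c => decide (0 < (PySem.Dict.counter text.toList).getD c 0))).map
        (fun c => (PySem.Dict.counter text.toList).getD c 0) = pvCnt text.toList := by
    have hfe : (PySem.Set.ofList text.toList).filter
        (fun c => decide (0 < (PySem.Dict.counter text.toList).getD c 0)) = PySem.Set.ofList text.toList := by
      apply List.filter_eq_self.mpr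
      intro c hc
      have hcmem : c ∈ text.toList := (PySem.Set.mem_ofList _ c).mp hc
      simp only [PySem.Dict.getD_counter, decide_eq_true_eq]
      exact_mod_cast List.count_pos_iff.mpr hcmem
    rw [hfe]
    unfold pvCnt
    apply List.map_congr_left
    intro c _
    rw [PySem.Dict.getD_counter]
  rw [hres]
  rcases pvOuterA_spec (pvCnt text.toList).length (pvCnt text.toList) [] (le_refl _)
      (List.Pairwise.nil) (by simp) with ⟨rest', hperm, heq, hpair⟩
  simp only [List.nil_append, List.length_nil, Nat.cast_zero] at heq
  rw [heq]
  have := PySem.List.sorted_id_eq_of_perm_of_pairwise (pvCnt text.toList) rest' hperm (by simpa using hpair)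
  rw [this]

theorem pvB_eq (text : String) :
    sorted_frequencies_alt text
      = PySem.List.sorted (pvCnt (PySem.List.sorted text.toList (fun c => c))) (fun v => v) := by
  unfold sorted_frequencies_alt
  rw [pvRunLoop_none _ (by
    have := PySem.List.sorted_pairwise text.toList (fun c => c)
    simpa using this)]

theorem pvCnt_perm (text : String) :
    (pvCnt text.toList).Perm (pvCnt (PySem.List.sorted text.toList (fun c => c))) := by
  have hts : (PySem.List.sorted text.toList (fun c => c)).Perm text.toList :=
    PySem.List.sorted_perm text.toList (fun c => c) false
  have hof : (PySem.Set.ofList text.toList).Perm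
      (PySem.Set.ofList (PySem.List.sorted text.toList (fun c => c))) := by
    rw [List.perm_ext_iff_of_nodup (PySem.Set.nodup_ofList _) (PySem.Set.nodup_ofList _)]
    intro a
    rw [PySem.Set.mem_ofList, PySem.Set.mem_ofList, hts.mem_iff]
  have hfun : (fun c => ((text.toList.count c : Nat) : Int))
      = fun c => (((PySem.List.sorted text.toList (fun c => c)).count c : Nat) : Int) := by
    funext c
    rw [hts.count_eq]
  unfold pvCnt
  rw [hfun]
  exact hof.map _

-- ===== VERDICT (by name: the statement is the Claim_ definition above) =====
theorem sorted_frequencies_spec : Claim_equal_sorted_frequencies := by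
  intro text _
  unfold Spec_sorted_frequencies
  rw [pvA_eq, pvB_eq]
  exact PySem.List.sorted_eq_sorted_of_perm _ _ _ (fun a b h => h) (pvCnt_perm text)
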